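-- pv_equiv track=rewrite | github.com/ljthink/BlindAIRobot | BlindRobot.py | finalP
-- ===== SOURCE A (Python) =====
-- def make(dir,x,mainl, dimensions):
--     i = int(x/dimensions)
--     j = x%dimensions
--     if 'UP' == dir and i != 0:
--         if mainl[i-1][j] != '0':
--             i = i-1
--     if 'RIGHT' == dir and j != dimensions-1:
--         if mainl[i][j+1] != '0':
--             j = j+1
--     if 'DOWN' == dir and i != dimensions-1:
--         if mainl[i+1][j] != '0':
--             i = i+1
--     if 'LEFT' == dir and j != 0:
--         if mainl[i][j-1] != '0':
--             j = j-1
--     return j + i*dimensions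
--
-- def finalP(temp, x, y, mL):
--     tempL = []
--     for corner,num in enumerate(temp):
--         if corner != 0:
--             dir = ""
--             a,c = temp[corner-1]
--             b,d = num
--
--             if a-b == -1:
--                 dir = 'DOWN'
--
--             elif a-b == 1:
--                 dir = 'UP'
--
--             elif c-d == 1:
--                 dir = 'LEFT'
--
--             else:
--                 dir = 'RIGHT'
--         else:
--             continue
--         tempL.append(dir)
--
--     tempA = x
--     tempB = y
--     for d in tempL:
--         tempA = make(d, tempA, mL, len(mL))
--         tempB = make(d, tempB, mL, len(mL))
--
--     return tempA, tempB, tempL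
-- ===== SOURCE B (Python) =====
-- _DELTAS = {'UP': (-1, 0), 'RIGHT': (0, 1), 'DOWN': (1, 0), 'LEFT': (0, -1)}
-- _ROW_DIR = {-1: 'DOWN', 1: 'UP'}
--
-- def _transitions(mL, n, di, dj):
--     # next-cell table for one direction: table[pos] is where a robot at pos ends up
--     def nxt(pos):
--         i, j = divmod(pos, n)
--         ni, nj = i + di, j + dj
--         return ni * n + nj if 0 <= ni < n and 0 <= nj < n and mL[ni][nj] != '0' else pos
--     return [nxt(pos) for pos in range(n * n)]
--
-- def finalP(temp, x, y, mL):
--     n = len(mL)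
--     dirs = [_ROW_DIR.get(p[0] - q[0]) or ('LEFT' if p[1] - q[1] == 1 else 'RIGHT')
--             for p, q in zip(temp, temp[1:])]
--     # compile the grid into one transition table per direction that occurs, once
--     step = {}
--     for d in dirs:
--         if d not in step:
--             di, dj = _DELTAS[d]
--             step[d] = _transitions(mL, n, di, dj)
--     for d in dirs:
--         x, y = step[d][x], step[d][y]
--     return x, y, dirs
-- ===== Notes on version B (the rewrite author's own statement) =====
-- stated objective: alternative
-- what changed: B compiles the grid once into a per-direction transition table (an automaton: next-cell arrays over all n^2 cells), so the replay loop is pure table indexing with no bounds/obstacle branch logic, and builds the direction list by a zip comprehension with a delta->direction dict lookup instead of A's enumerate-and-index pass through make's four branch blocks.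
-- outside the precondition, e.g. on finalP([(0, 0), (1, 1)], -2, 0, [['1']]): A returns (-1, 0, ['DOWN']), B raises IndexError
import Mathlib
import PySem

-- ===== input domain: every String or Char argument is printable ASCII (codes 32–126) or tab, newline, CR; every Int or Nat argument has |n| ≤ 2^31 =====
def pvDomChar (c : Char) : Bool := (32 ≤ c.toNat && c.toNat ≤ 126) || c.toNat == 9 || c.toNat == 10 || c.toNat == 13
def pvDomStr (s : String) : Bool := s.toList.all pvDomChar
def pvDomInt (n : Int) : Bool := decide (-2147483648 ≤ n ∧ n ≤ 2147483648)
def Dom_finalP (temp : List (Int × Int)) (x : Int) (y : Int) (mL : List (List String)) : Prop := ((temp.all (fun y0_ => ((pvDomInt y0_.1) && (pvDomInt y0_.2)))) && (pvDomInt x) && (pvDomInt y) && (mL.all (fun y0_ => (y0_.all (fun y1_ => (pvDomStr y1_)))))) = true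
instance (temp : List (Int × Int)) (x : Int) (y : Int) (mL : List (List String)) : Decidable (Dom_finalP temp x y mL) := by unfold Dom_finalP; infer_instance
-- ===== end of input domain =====

-- B compiles the grid once into per-direction next-cell transition tables (an automaton) so the
-- replay loop is branch-free table indexing, instead of A's build-list-then-replay through make's
-- four checked branch blocks (objective: alternative, same cost on the natural domain).

-- ===== PORT A =====
-- make(dir, x, mainl, dimensions); int(x/dims) is truncating division (exact on the admitted domain);
-- out-of-range mainl[...][...] (IndexError in Python) is excluded by Pre_, pyGetD's default is never read there.
def finalPMake (dir : String) (x : Int) (mainl : List (List String)) (dims : Int) : Int :=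
  let i := x.tdiv dims
  let j := PySem.Int.mod x dims
  let i := if dir = "UP" ∧ i ≠ 0 ∧ PySem.List.pyGetD (PySem.List.pyGetD mainl (i - 1) []) j "0" ≠ "0" then i - 1 else i
  let j := if dir = "RIGHT" ∧ j ≠ dims - 1 ∧ PySem.List.pyGetD (PySem.List.pyGetD mainl i []) (j + 1) "0" ≠ "0" then j + 1 else j
  let i := if dir = "DOWN" ∧ i ≠ dims - 1 ∧ PySem.List.pyGetD (PySem.List.pyGetD mainl (i + 1) []) j "0" ≠ "0" then i + 1 else i
  let j := if dir = "LEFT" ∧ j ≠ 0 ∧ PySem.List.pyGetD (PySem.List.pyGetD mainl i []) (j - 1) "0" ≠ "0" then j - 1 else j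
  j + i * dims

def finalP (temp : List (Int × Int)) (x : Int) (y : Int) (mL : List (List String)) : Int × Int × List String :=
  let tempL := (PySem.List.enumerate temp).foldl
    (fun tempL c =>
      if c.1 ≠ 0 then
        tempL ++ [if (PySem.List.pyGetD temp (c.1 - 1) ((0:Int), (0:Int))).1 - c.2.1 = -1 then "DOWN"
          else if (PySem.List.pyGetD temp (c.1 - 1) ((0:Int), (0:Int))).1 - c.2.1 = 1 then "UP"
          else if (PySem.List.pyGetD temp (c.1 - 1) ((0:Int), (0:Int))).2 - c.2.2 = 1 then "LEFT"
          else "RIGHT"]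
      else tempL) []
  let p := tempL.foldl
    (fun (p : Int × Int) d => (finalPMake d p.1 mL (mL.length : Int), finalPMake d p.2 mL (mL.length : Int))) (x, y)
  (p.1, p.2, tempL)

-- ===== PORT B =====
-- _transitions's inner nxt(pos): bounded delta move on the n x n grid
def finalPNext (mL : List (List String)) (n di dj pos : Int) : Int :=
  let i := PySem.Int.floordiv pos n
  let j := PySem.Int.mod pos n
  let ni := i + di
  let nj := j + dj
  if 0 ≤ ni ∧ ni < n ∧ 0 ≤ nj ∧ nj < n ∧ PySem.List.pyGetD (PySem.List.pyGetD mL ni []) nj "0" ≠ "0"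
  then ni * n + nj else pos

-- _transitions(mL, n, di, dj): next-cell table for one direction over all n*n cells
def finalPTransitions (mL : List (List String)) (n di dj : Int) : List Int :=
  (PySem.List.pyRange 0 (n * n) 1).map (finalPNext mL n di dj)

-- module-level _DELTAS
def finalPDeltas : PySem.Dict String (Int × Int) :=
  PySem.Dict.ofList [("UP", (-1, 0)), ("RIGHT", (0, 1)), ("DOWN", (1, 0)), ("LEFT", (0, -1))]

-- _ROW_DIR.get(a-b) or ('LEFT' if c-d == 1 else 'RIGHT')
def finalPDir (p q : Int × Int) : String :=
  ((PySem.Dict.ofList [((-1 : Int), "DOWN"), ((1 : Int), "UP")]).get? (p.1 - q.1)).getD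
    (if p.2 - q.2 = 1 then "LEFT" else "RIGHT")

-- the build loop: 'if d not in step: di, dj = _DELTAS[d]; step[d] = _transitions(mL, n, di, dj)';
-- _DELTAS[d] (KeyError never reached: d is one of the four names) ported as get?/getD
def finalPBuild (mL : List (List String)) (n : Int) (dirs : List String) : PySem.Dict String (List Int) :=
  dirs.foldl (fun st d =>
    if st.contains d then st
    else st.insert d (finalPTransitions mL n ((finalPDeltas.get? d).getD (0, 0)).1
      ((finalPDeltas.get? d).getD (0, 0)).2)) PySem.Dict.empty

def finalP_alt (temp : List (Int × Int)) (x : Int) (y : Int) (mL : List (List String)) : Int × Int × List String :=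
  let n : Int := mL.length
  let dirs := (temp.zip temp.tail).map (fun pr => finalPDir pr.1 pr.2)
  let step := finalPBuild mL n dirs
  let p := dirs.foldl (fun (p : Int × Int) d =>
    (PySem.List.pyGetD (step.getD d []) p.1 0, PySem.List.pyGetD (step.getD d []) p.2 0)) (x, y)
  (p.1, p.2, dirs)

-- ===== PRECONDITION & SPEC =====
-- Pre_ restricts inputs with at least one move (len(temp) ≥ 2) to the natural grid domain: a non-empty
-- mL whose rows have length ≥ len(mL) and positions in [0, len(mL)^2). Outside it A usually raises
-- (ZeroDivisionError on empty mL, IndexError on out-of-range cells); where A still returns (small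
-- negative positions), its value is an int(x/n)-truncation/negative-% wraparound artefact of make.
def Pre_finalP (temp : List (Int × Int)) (x : Int) (y : Int) (mL : List (List String)) : Prop :=
  temp.length ≤ 1 ∨
    (0 < mL.length ∧ 0 ≤ x ∧ x < (mL.length : Int) * mL.length ∧
     0 ≤ y ∧ y < (mL.length : Int) * mL.length ∧ ∀ row ∈ mL, mL.length ≤ row.length)
instance (temp : List (Int × Int)) (x : Int) (y : Int) (mL : List (List String)) : Decidable (Pre_finalP temp x y mL) := by unfold Pre_finalP; infer_instance

def pvWitness_finalP : (List (Int × Int)) × Int × Int × List (List String) :=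
  ([(0, 0), (0, 1)], 0, 3, [["1", "1"], ["0", "1"]])

def Spec_finalP (temp : List (Int × Int)) (x : Int) (y : Int) (mL : List (List String)) (out : Int × Int × List String) : Prop := out = finalP_alt temp x y mL
instance (temp : List (Int × Int)) (x : Int) (y : Int) (mL : List (List String)) (out : Int × Int × List String) : Decidable (Spec_finalP temp x y mL out) := by unfold Spec_finalP; infer_instance

-- ===== CLAIM (what is proved, stated in full; the proofs are below) =====
def Claim_equal_finalP : Prop := ∀ (temp : List (Int × Int)) (x : Int) (y : Int) (mL : List (List String)), Dom_finalP temp x y mL → Pre_finalP temp x y mL → Spec_finalP temp x y mL (finalP temp x y mL)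

-- ===== LEMMAS AND PROOFS =====

-- the direction strings of the steps prev -> rest.head -> …
def pvDirs : (Int × Int) → List (Int × Int) → List String
  | _, [] => []
  | p, q :: t => finalPDir p q :: pvDirs q t

-- finalPDir equals A's branch chain
lemma pvDir_chain (p q : Int × Int) :
    finalPDir p q = (if p.1 - q.1 = -1 then "DOWN"
      else if p.1 - q.1 = 1 then "UP"
      else if p.2 - q.2 = 1 then "LEFT"
      else "RIGHT") := by
  simp only [finalPDir, PySem.Dict.ofList, PySem.Dict.update, PySem.Dict.insert,
    PySem.Dict.empty, PySem.Dict.get?]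
  rcases eq_or_ne (p.1 - q.1) (-1) with h1 | h1
  · simp [h1]
  · rcases eq_or_ne (p.1 - q.1) 1 with h2 | h2
    · simp [h2]
    · simp [h1, h2, h1.symm, h2.symm]

lemma pvDir_name (p q : Int × Int) :
    finalPDir p q = "UP" ∨ finalPDir p q = "RIGHT" ∨ finalPDir p q = "DOWN" ∨ finalPDir p q = "LEFT" := by
  rw [pvDir_chain]; split_ifs <;> simp

lemma pvDirs_name (prev : Int × Int) (rest : List (Int × Int)) :
    ∀ d ∈ pvDirs prev rest, d = "UP" ∨ d = "RIGHT" ∨ d = "DOWN" ∨ d = "LEFT" := by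
  induction rest generalizing prev with
  | nil => intro d hd; simp [pvDirs] at hd
  | cons q t ih =>
    intro d hd
    rcases (by simpa [pvDirs] using hd : d = finalPDir prev q ∨ d ∈ pvDirs q t) with h | h
    · rw [h]; exact pvDir_name prev q
    · exact ih q d h

-- B's zip comprehension produces pvDirs
lemma pvZipMap (rest : List (Int × Int)) : ∀ prev : Int × Int,
    ((prev :: rest).zip rest).map (fun pr => finalPDir pr.1 pr.2) = pvDirs prev rest := by
  induction rest with
  | nil => intro prev; simp [pvDirs]
  | cons q t ih => intro prev; simp [pvDirs, ih q]

lemma pvCell_bounds {n ni nj : Int} (h : 0 ≤ ni) (h2 : ni < n) (h3 : 0 ≤ nj) (h4 : nj < n) :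
    0 ≤ ni * n + nj ∧ ni * n + nj < n * n := by
  constructor
  · have := mul_nonneg h (by linarith : (0:Int) ≤ n); linarith
  · nlinarith

lemma pvNext_bounds (mL : List (List String)) (n di dj pos : Int)
    (h0 : 0 ≤ pos) (h1 : pos < n * n) :
    0 ≤ finalPNext mL n di dj pos ∧ finalPNext mL n di dj pos < n * n := by
  simp only [finalPNext]
  split_ifs with h
  · exact pvCell_bounds h.1 h.2.1 h.2.2.1 h.2.2.2.1
  · exact ⟨h0, h1⟩

-- one table entry equals make's result, for each of the four direction names
lemma pvMake_eq (mL : List (List String)) (d : String) (di dj : Int)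
    (hc : (d = "UP" ∧ di = -1 ∧ dj = 0) ∨ (d = "RIGHT" ∧ di = 0 ∧ dj = 1) ∨
          (d = "DOWN" ∧ di = 1 ∧ dj = 0) ∨ (d = "LEFT" ∧ di = 0 ∧ dj = -1))
    (pos : Int) (hn : 0 < mL.length)
    (h0 : 0 ≤ pos) (h1 : pos < (mL.length : Int) * mL.length) :
    finalPMake d pos mL (mL.length : Int) = finalPNext mL (mL.length : Int) di dj pos := by
  have hn' : (0:Int) < (mL.length : Int) := by exact_mod_cast hn
  have htd : pos.tdiv (mL.length:Int) = PySem.Int.floordiv pos (mL.length:Int) := by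
    rw [PySem.Int.floordiv_eq_ediv_of_pos hn', Int.tdiv_eq_ediv_of_nonneg h0]
  have hi0 : 0 ≤ PySem.Int.floordiv pos (mL.length:Int) := by
    rw [PySem.Int.floordiv_eq_ediv_of_pos hn']; exact Int.ediv_nonneg h0 hn'.le
  have hi1 : PySem.Int.floordiv pos (mL.length:Int) < (mL.length:Int) := by
    rw [PySem.Int.floordiv_eq_ediv_of_pos hn']; exact (Int.ediv_lt_iff_lt_mul hn').mpr h1
  have hj0 : 0 ≤ PySem.Int.mod pos (mL.length:Int) := PySem.Int.mod_nonneg pos hn'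
  have hj1 : PySem.Int.mod pos (mL.length:Int) < (mL.length:Int) := PySem.Int.mod_lt pos hn'
  have hrec : PySem.Int.floordiv pos (mL.length:Int) * (mL.length:Int) + PySem.Int.mod pos (mL.length:Int) = pos :=
    PySem.Int.floordiv_mul_add_mod pos (mL.length:Int)
  rcases hc with ⟨hd, hdi, hdj⟩ | ⟨hd, hdi, hdj⟩ | ⟨hd, hdi, hdj⟩ | ⟨hd, hdi, hdj⟩ <;>
    subst hd <;> subst hdi <;> subst hdj
  · -- UP, delta (-1, 0)
    simp only [finalPMake, finalPNext, String.reduceEq, false_and, if_false, true_and, add_zero]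
    rw [htd]
    set n : Int := (mL.length : Int)
    set i := PySem.Int.floordiv pos n
    set j := PySem.Int.mod pos n
    have e : i + -1 = i - 1 := by ring
    rw [e]
    split_ifs with hA hB hC
    · ring
    · exact absurd ⟨by omega, by omega, hj0, hj1, hA.2⟩ hB
    · exact absurd ⟨by omega, hC.2.2.2.2⟩ hA
    · linarith [hrec]
  · -- RIGHT, delta (0, 1)
    simp only [finalPMake, finalPNext, String.reduceEq, false_and, if_false, true_and, add_zero]
    rw [htd]
    set n : Int := (mL.length : Int)
    set i := PySem.Int.floordiv pos n
    set j := PySem.Int.mod pos n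
    split_ifs with hA hB hC
    · ring
    · exact absurd ⟨hi0, hi1, by omega, by omega, hA.2⟩ hB
    · exact absurd ⟨by omega, hC.2.2.2.2⟩ hA
    · linarith [hrec]
  · -- DOWN, delta (1, 0)
    simp only [finalPMake, finalPNext, String.reduceEq, false_and, if_false, true_and, add_zero]
    rw [htd]
    set n : Int := (mL.length : Int)
    set i := PySem.Int.floordiv pos n
    set j := PySem.Int.mod pos n
    split_ifs with hA hB hC
    · ring
    · exact absurd ⟨by omega, by omega, hj0, hj1, hA.2⟩ hB
    · exact absurd ⟨by omega, hC.2.2.2.2⟩ hA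
    · linarith [hrec]
  · -- LEFT, delta (0, -1)
    simp only [finalPMake, finalPNext, String.reduceEq, false_and, if_false, true_and, add_zero]
    rw [htd]
    set n : Int := (mL.length : Int)
    set i := PySem.Int.floordiv pos n
    set j := PySem.Int.mod pos n
    have e : j + -1 = j - 1 := by ring
    rw [e]
    split_ifs with hA hB hC
    · ring
    · exact absurd ⟨hi0, hi1, by omega, by omega, hA.2⟩ hB
    · exact absurd ⟨by omega, hC.2.2.2.2⟩ hA
    · linarith [hrec]

-- the table stored for a direction name, as finalP_alt's build loop computes it
def pvTrans (mL : List (List String)) (d : String) : List Int :=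
  finalPTransitions mL (mL.length : Int) ((finalPDeltas.get? d).getD (0, 0)).1
    ((finalPDeltas.get? d).getD (0, 0)).2

-- a table entry equals make, for a valid direction name and in-range position
lemma pvTrans_getD (mL : List (List String)) (d : String)
    (hd : d = "UP" ∨ d = "RIGHT" ∨ d = "DOWN" ∨ d = "LEFT")
    (pos : Int) (hn : 0 < mL.length)
    (h0 : 0 ≤ pos) (h1 : pos < (mL.length : Int) * mL.length) :
    PySem.List.pyGetD (pvTrans mL d) pos 0 = finalPMake d pos mL (mL.length : Int) := by
  have hrow : ∀ di dj,
      PySem.List.pyGetD (finalPTransitions mL (mL.length : Int) di dj) pos 0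
        = finalPNext mL (mL.length : Int) di dj pos := by
    intro di dj
    exact PySem.List.pyGetD_map_pyRange_of_nonneg _ _ _ _ h0 h1
  rcases hd with hd | hd | hd | hd <;> subst hd
  · rw [show pvTrans mL "UP" = finalPTransitions mL (mL.length : Int) (-1) 0 from rfl, hrow]
    exact (pvMake_eq mL "UP" (-1) 0 (Or.inl ⟨rfl, rfl, rfl⟩) pos hn h0 h1).symm
  · rw [show pvTrans mL "RIGHT" = finalPTransitions mL (mL.length : Int) 0 1 from rfl, hrow]
    exact (pvMake_eq mL "RIGHT" 0 1 (Or.inr (Or.inl ⟨rfl, rfl, rfl⟩)) pos hn h0 h1).symm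
  · rw [show pvTrans mL "DOWN" = finalPTransitions mL (mL.length : Int) 1 0 from rfl, hrow]
    exact (pvMake_eq mL "DOWN" 1 0 (Or.inr (Or.inr (Or.inl ⟨rfl, rfl, rfl⟩))) pos hn h0 h1).symm
  · rw [show pvTrans mL "LEFT" = finalPTransitions mL (mL.length : Int) 0 (-1) from rfl, hrow]
    exact (pvMake_eq mL "LEFT" 0 (-1) (Or.inr (Or.inr (Or.inr ⟨rfl, rfl, rfl⟩))) pos hn h0 h1).symm

-- the build loop stores pvTrans for every direction that occurs in dirs
lemma pvBuild_getD (mL : List (List String)) :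
    ∀ (ds : List String) (st : PySem.Dict String (List Int)) (d : String),
    (st.get? d = none ∨ st.get? d = some (pvTrans mL d)) →
    (d ∈ ds ∨ st.get? d = some (pvTrans mL d)) →
    (ds.foldl (fun st d =>
      if st.contains d then st
      else st.insert d (finalPTransitions mL (mL.length : Int) ((finalPDeltas.get? d).getD (0, 0)).1
        ((finalPDeltas.get? d).getD (0, 0)).2)) st).getD d [] = pvTrans mL d := by
  intro ds
  induction ds with
  | nil =>
    intro st d hinv hmem
    rcases hmem with hmem | hsome
    · exact absurd hmem (List.not_mem_nil)
    · rw [List.foldl_nil, PySem.Dict.getD_eq_get?_getD, hsome]; rfl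
  | cons e t ih =>
    intro st d hinv hmem
    rw [List.foldl_cons]
    by_cases hc : st.contains e = true
    · rw [if_pos hc]
      refine ih st d hinv ?_
      rcases hmem with hmem | hsome
      · rcases List.mem_cons.mp hmem with he | ht
        · subst he
          rcases hinv with hnone | hsome
          · exfalso
            have := PySem.Dict.contains_eq_isSome_get? (d := st) (k := d)
            rw [hnone] at this; simp [hc] at this
          · exact Or.inr hsome
        · exact Or.inl ht
      · exact Or.inr hsome
    · rw [if_neg hc]
      by_cases hde : d = e
      · subst hde
        refine ih _ d ?_ ?_
        · exact Or.inr (by rw [PySem.Dict.get?_insert_self]; rfl)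
        · exact Or.inr (by rw [PySem.Dict.get?_insert_self]; rfl)
      · have hget : (st.insert e (finalPTransitions mL (mL.length : Int)
            ((finalPDeltas.get? e).getD (0, 0)).1 ((finalPDeltas.get? e).getD (0, 0)).2)).get? d
            = st.get? d := PySem.Dict.get?_insert_of_ne st _ hde
        refine ih _ d (by rw [hget]; exact hinv) ?_
        rcases hmem with hmem | hsome
        · rcases List.mem_cons.mp hmem with he | ht
          · exact absurd he hde
          · exact Or.inl ht
        · exact Or.inr (by rw [hget]; exact hsome)

-- the replay fold through any dict that stores make's table equals the replay fold through make
lemma pvReplay (mL : List (List String)) (S : PySem.Dict String (List Int)) (hn : 0 < mL.length) :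
    ∀ (ds : List String) (x y : Int),
    (∀ d ∈ ds, d = "UP" ∨ d = "RIGHT" ∨ d = "DOWN" ∨ d = "LEFT") →
    (∀ d ∈ ds, S.getD d [] = pvTrans mL d) →
    0 ≤ x → x < (mL.length : Int) * mL.length → 0 ≤ y → y < (mL.length : Int) * mL.length →
    ds.foldl (fun (p : Int × Int) d =>
        (PySem.List.pyGetD (S.getD d []) p.1 0,
         PySem.List.pyGetD (S.getD d []) p.2 0)) (x, y)
      = ds.foldl (fun (p : Int × Int) d =>
          (finalPMake d p.1 mL (mL.length : Int), finalPMake d p.2 mL (mL.length : Int))) (x, y) := by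
  intro ds
  induction ds with
  | nil => intro x y _ _ _ _ _ _; rfl
  | cons d t ih =>
    intro x y hnames htab hx0 hx1 hy0 hy1
    have hd := hnames d (by simp)
    have hx : PySem.List.pyGetD (S.getD d []) x 0 = finalPMake d x mL (mL.length : Int) := by
      rw [htab d (by simp)]; exact pvTrans_getD mL d hd x hn hx0 hx1
    have hy : PySem.List.pyGetD (S.getD d []) y 0 = finalPMake d y mL (mL.length : Int) := by
      rw [htab d (by simp)]; exact pvTrans_getD mL d hd y hn hy0 hy1
    simp only [List.foldl_cons, hx, hy]
    have hdelta : ∃ di dj, (d = "UP" ∧ di = -1 ∧ dj = 0) ∨ (d = "RIGHT" ∧ di = 0 ∧ dj = 1) ∨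
        (d = "DOWN" ∧ di = 1 ∧ dj = 0) ∨ (d = "LEFT" ∧ di = 0 ∧ dj = -1) := by
      rcases hd with h | h | h | h
      · exact ⟨-1, 0, Or.inl ⟨h, rfl, rfl⟩⟩
      · exact ⟨0, 1, Or.inr (Or.inl ⟨h, rfl, rfl⟩)⟩
      · exact ⟨1, 0, Or.inr (Or.inr (Or.inl ⟨h, rfl, rfl⟩))⟩
      · exact ⟨0, -1, Or.inr (Or.inr (Or.inr ⟨h, rfl, rfl⟩))⟩
    obtain ⟨di, dj, hc⟩ := hdelta
    have hbx : 0 ≤ finalPMake d x mL (mL.length : Int) ∧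
        finalPMake d x mL (mL.length : Int) < (mL.length : Int) * mL.length := by
      rw [pvMake_eq mL d di dj hc x hn hx0 hx1]; exact pvNext_bounds mL _ di dj x hx0 hx1
    have hby : 0 ≤ finalPMake d y mL (mL.length : Int) ∧
        finalPMake d y mL (mL.length : Int) < (mL.length : Int) * mL.length := by
      rw [pvMake_eq mL d di dj hc y hn hy0 hy1]; exact pvNext_bounds mL _ di dj y hy0 hy1
    exact ih _ _ (fun e he => hnames e (by simp [he])) (fun e he => htab e (by simp [he]))
      hbx.1 hbx.2 hby.1 hby.2

-- A's first pass produces pvDirs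
lemma pvPhase1 (temp : List (Int × Int)) :
    ∀ (rest : List (Int × Int)) (s : Nat) (prev : Int × Int) (acc : List String),
    1 ≤ s → temp.drop (s - 1) = prev :: rest →
    (PySem.List.enumerate rest (s : Int)).foldl
      (fun tempL c =>
        if c.1 ≠ 0 then
          tempL ++ [if (PySem.List.pyGetD temp (c.1 - 1) ((0:Int), (0:Int))).1 - c.2.1 = -1 then "DOWN"
            else if (PySem.List.pyGetD temp (c.1 - 1) ((0:Int), (0:Int))).1 - c.2.1 = 1 then "UP"
            else if (PySem.List.pyGetD temp (c.1 - 1) ((0:Int), (0:Int))).2 - c.2.2 = 1 then "LEFT"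
            else "RIGHT"]
        else tempL) acc
      = acc ++ pvDirs prev rest := by
  intro rest
  induction rest with
  | nil => intro s prev acc hs hd; simp [PySem.List.enumerate_nil, pvDirs]
  | cons q t ih =>
    intro s prev acc hs hd
    rw [PySem.List.enumerate_cons, List.foldl_cons]
    have hget : PySem.List.pyGetD temp ((s:Int) - 1) ((0:Int), (0:Int)) = prev := by
      have hcast : (s:Int) - 1 = ((s - 1 : Nat) : Int) := by omega
      rw [hcast, PySem.List.pyGetD_natCast]
      have h0 : temp[s-1]? = some prev := by
        have h := (List.getElem?_drop (xs := temp) (i := s-1) (j := 0)).symm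
        rw [hd] at h; simpa using h
      simp [List.getD, h0]
    have hne : ¬ (((s:Int), q).1 = 0) := by simp; omega
    simp only [ne_eq, hne, not_false_iff, if_pos, hget]
    rw [show (if prev.1 - q.1 = -1 then "DOWN"
            else if prev.1 - q.1 = 1 then "UP"
            else if prev.2 - q.2 = 1 then "LEFT"
            else "RIGHT") = finalPDir prev q from (pvDir_chain prev q).symm]
    have hdrop : temp.drop (s + 1 - 1) = q :: t := by
      have h1 : (temp.drop (s-1)).tail = temp.drop (s - 1 + 1) := List.tail_drop
      rw [hd] at h1
      have h2 : s - 1 + 1 = s + 1 - 1 := by omega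
      rw [h2] at h1; exact h1.symm
    have hih := ih (s + 1) q (acc ++ [finalPDir prev q]) (by omega) hdrop
    have hc : ((s:Int) + 1) = ((s + 1 : Nat) : Int) := by push_cast; ring
    rw [hc, hih, pvDirs]
    simp

-- ===== VERDICT (by name: the statement is the Claim_ definition above) =====
theorem finalP_spec : Claim_equal_finalP := by
  intro temp x y mL hdom hpre
  unfold Spec_finalP
  cases temp with
  | nil => rfl
  | cons prev rest =>
    have hphase := pvPhase1 (prev :: rest) rest 1 prev [] (le_refl 1) (by simp)
    norm_num at hphase
    simp only [finalP, finalP_alt, PySem.List.enumerate_cons, List.foldl_cons, List.tail_cons]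
    norm_num
    rw [hphase, pvZipMap rest prev]
    cases rest with
    | nil => simp [pvDirs]
    | cons q t =>
      rcases hpre with h | h
      · simp at h
      · obtain ⟨hn, hx0, hx1, hy0, hy1, -⟩ := h
        have htab : ∀ d ∈ pvDirs prev (q :: t),
            (finalPBuild mL (mL.length : Int) (pvDirs prev (q :: t))).getD d [] = pvTrans mL d := by
          intro d hd
          exact pvBuild_getD mL (pvDirs prev (q :: t)) PySem.Dict.empty d
            (Or.inl (PySem.Dict.get?_empty d)) (Or.inl hd)
        rw [pvReplay mL (finalPBuild mL (mL.length : Int) (pvDirs prev (q :: t))) hn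
          (pvDirs prev (q :: t)) x y (pvDirs_name prev (q :: t)) htab hx0 hx1 hy0 hy1]
        exact ⟨rfl, rfl, rfl⟩
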